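-- pv_equiv track=rewrite | github.com/pantaflex44/kotidien | code/funcs.py | text2color
-- ===== SOURCE A (Python) =====
-- def text2color(text: str, length: int = 180) -> list:
--     t = text.strip()
--     if t == '':
--         return [0, 0, 0], "#000000"
--     hash = 0
--     for i in range(len(t)):
--         hash = ord(t[i]) + ((hash << 5) - hash)
--     b = hash & length
--     g = (hash >> 8) & length
--     r = (hash >> 16) & length
--     html = "#{:02x}{:02x}{:02x}".format(r, g, b)
--     return [r, g, b], html
-- ===== SOURCE B (Python) =====
-- def text2color(text: str, length: int = 180) -> list:
--     t = text.strip()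
--     pw = [1]
--     for _ in range(len(t) - 1):
--         pw.append(pw[-1] * 31)
--     h = sum(o * p for o, p in zip(map(ord, t), reversed(pw)))
--     rgb = [(h >> s) & length for s in (16, 8, 0)]
--     return rgb, "#" + "".join("%02x" % v for v in rgb)
-- ===== Notes on version B (the rewrite author's own statement) =====
-- stated objective: alternative
-- what changed: Replaces the Horner rolling accumulator (hash = ord + (hash<<5) - hash) and sequential b/g/r assignments with staged passes: a precomputed list of powers of 31, the hash as the polynomial sum of ord(c) times the reversed powers via zip, channels built by mapping the mask over a shift list, and html joined from the channel list; the empty-string early return becomes redundant and is dropped.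
import Mathlib
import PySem

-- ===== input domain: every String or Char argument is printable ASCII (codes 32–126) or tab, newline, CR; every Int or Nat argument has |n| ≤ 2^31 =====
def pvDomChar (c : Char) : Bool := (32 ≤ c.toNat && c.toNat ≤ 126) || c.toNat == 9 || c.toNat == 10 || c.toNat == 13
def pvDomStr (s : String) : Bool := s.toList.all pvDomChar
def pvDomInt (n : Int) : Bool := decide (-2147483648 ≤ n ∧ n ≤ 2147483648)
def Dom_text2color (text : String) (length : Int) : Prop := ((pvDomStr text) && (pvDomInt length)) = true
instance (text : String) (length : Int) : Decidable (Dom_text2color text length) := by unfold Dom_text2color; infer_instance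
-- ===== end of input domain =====

-- B replaces A's Horner rolling accumulator and sequential channel assignments by
-- staged passes: a precomputed powers-of-31 list, the hash as a zip/sum polynomial,
-- masks mapped over a shift list, html joined; objective: alternative (same cost).

-- ===== PORT A =====
-- shared formatting helper: Python's "{:02x}".format(n) (= "%02x" % n in Source B)
def pvHexChar (n : Nat) : Char := if n < 10 then Char.ofNat (48 + n) else Char.ofNat (87 + n)

def pvHexChars (n : Nat) : List Char :=
  if _ : n < 16 then [pvHexChar n]
  else pvHexChars (n / 16) ++ [pvHexChar (n % 16)]
  decreasing_by exact Nat.div_lt_self (by omega) (by omega)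

def pvFmt02x (n : Int) : String :=
  if n < 0 then String.ofList ('-' :: pvHexChars n.natAbs)
  else String.ofList (if (pvHexChars n.natAbs).length < 2 then '0' :: pvHexChars n.natAbs
                  else pvHexChars n.natAbs)

def text2color (text : String) (length : Int) : List Int × String :=
  let t := PySem.Str.strip text
  if t == "" then ([0, 0, 0], "#000000")
  else
    let hash : Int := t.toList.foldl (fun (h : Int) (c : Char) => (c.toNat : Int) + ((h <<< (5:Nat)) - h)) 0
    let b := PySem.Int.band hash length
    let g := PySem.Int.band (hash >>> (8:Nat)) length
    let r := PySem.Int.band (hash >>> (16:Nat)) length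
    ([r, g, b], "#" ++ pvFmt02x r ++ pvFmt02x g ++ pvFmt02x b)

-- ===== PORT B =====
def text2color_alt (text : String) (length : Int) : List Int × String :=
  let t := (PySem.Str.strip text).toList
  let pw : List Int := (PySem.List.pyRange 0 ((t.length : Int) - 1) 1).foldl
      (fun acc _ => acc ++ [acc.getLast! * 31]) [1]
  let h : Int := (((t.map (fun c => (c.toNat : Int))).zip pw.reverse).map (fun p => p.1 * p.2)).sum
  let rgb := ([16, 8, 0] : List Nat).map (fun (s : Nat) => PySem.Int.band (h >>> s) length)
  (rgb, "#" ++ String.join (rgb.map pvFmt02x))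

-- ===== PRECONDITION & SPEC =====
def Spec_text2color (text : String) (length : Int) (out : List Int × String) : Prop := out = text2color_alt text length
instance (text : String) (length : Int) (out : List Int × String) : Decidable (Spec_text2color text length out) := by unfold Spec_text2color; infer_instance

-- ===== CLAIM (what is proved, stated in full; the proofs are below) =====
def Claim_equal_text2color : Prop := ∀ (text : String) (length : Int), Dom_text2color text length → Spec_text2color text length (text2color text length)

-- ===== LEMMAS AND PROOFS =====

-- A's step function is multiplication by 31.
theorem pvStepA_eq (l : List Char) (a : Int) :
    l.foldl (fun (h : Int) (c : Char) => (c.toNat : Int) + ((h <<< (5:Nat)) - h)) a =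
    l.foldl (fun (h : Int) (c : Char) => (c.toNat : Int) + 31 * h) a := by
  induction l generalizing a with
  | nil => rfl
  | cons x xs ih =>
    have hs : (x.toNat : Int) + ((a <<< (5:Nat)) - a) = (x.toNat : Int) + 31 * a := by
      simp [Int.shiftLeft_eq]; ring
    rw [List.foldl_cons, List.foldl_cons, hs, ih]

-- Horner's accumulator splits off its seed.
theorem pvHorner_shift (l : List Char) (a : Int) :
    l.foldl (fun (h : Int) (c : Char) => (c.toNat : Int) + 31 * h) a =
    l.foldl (fun (h : Int) (c : Char) => (c.toNat : Int) + 31 * h) 0 + a * 31 ^ l.length := by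
  induction l generalizing a with
  | nil => simp
  | cons x xs ih =>
    simp only [List.foldl_cons, List.length_cons]
    rw [ih ((x.toNat : Int) + 31 * a), ih ((x.toNat : Int) + 31 * 0)]
    ring

-- a fold whose body ignores the element depends only on the list's length
theorem pvFoldl_const {α β : Type} (g : β → β) (l : List α) (i : β) :
    l.foldl (fun acc _ => g acc) i = g^[l.length] i := by
  induction l generalizing i with
  | nil => rfl
  | cons x xs ih => simp [List.foldl_cons, ih, Function.iterate_succ_apply]

-- the append-last*31 iteration builds the ascending powers of 31
theorem pvPw_eq (m : Nat) :
    (fun (acc : List Int) => acc ++ [acc.getLast! * 31])^[m] [1] =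
    (List.range (m + 1)).map (fun k => (31:Int) ^ k) := by
  induction m with
  | zero => simp
  | succ m ih =>
    rw [Function.iterate_succ_apply', ih]
    have hlast : (((List.range (m + 1)).map (fun k => (31:Int) ^ k)).getLast! : Int) = 31 ^ m := by
      rw [List.range_succ, List.map_append]
      simp [List.getLast!_eq_getLast?_getD]
    rw [hlast, List.range_succ (n := m + 1), List.map_append]
    simp [pow_succ]

-- the zip-with-reversed-powers sum is A's Horner hash
theorem pvZipSum_eq (l : List Char) :
    (((l.map (fun c => (c.toNat : Int))).zip
        ((List.range l.length).map (fun k => (31:Int) ^ k)).reverse).map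
      (fun p => p.1 * p.2)).sum =
    l.foldl (fun (h : Int) (c : Char) => (c.toNat : Int) + 31 * h) 0 := by
  induction l with
  | nil => simp
  | cons x xs ih =>
    have hrev : ((List.range (x :: xs).length).map (fun k => (31:Int) ^ k)).reverse =
        (31:Int) ^ xs.length :: ((List.range xs.length).map (fun k => (31:Int) ^ k)).reverse := by
      rw [List.length_cons, List.range_succ, List.map_append, List.reverse_append]
      simp
    rw [List.map_cons, hrev, List.zip_cons_cons, List.map_cons, List.sum_cons, ih,
      List.foldl_cons, pvHorner_shift xs ((x.toNat : Int) + 31 * 0)]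
    ring

theorem pvBand_zero_left (n : Int) : PySem.Int.band 0 n = 0 := by
  rw [PySem.Int.band_comm]; exact PySem.Int.band_zero n

-- ===== VERDICT (by name: the statement is the Claim_ definition above) =====
theorem text2color_spec : Claim_equal_text2color := by
  intro text length _
  unfold Spec_text2color text2color text2color_alt
  by_cases ht : PySem.Str.strip text == ""
  · have h0 : (PySem.Str.strip text).toList = [] := by
      rw [beq_iff_eq] at ht; rw [ht]; rfl
    have hf : pvFmt02x 0 = "00" := by simp [pvFmt02x, pvHexChars, pvHexChar]
    simp only [ht, if_pos, h0, List.map_nil, List.zip_nil_left, List.sum_nil]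
    norm_num [pvBand_zero_left, hf, String.join]
    rfl
  · have hne : (PySem.Str.strip text).toList ≠ [] := by
      intro h; apply ht
      rw [beq_iff_eq]
      cases hs : PySem.Str.strip text
      simp_all
    have hlen : 1 ≤ (PySem.Str.strip text).toList.length := by
      cases h : (PySem.Str.strip text).toList with
      | nil => exact absurd h hne
      | cons a l => simp
    have hm : (((PySem.Str.strip text).toList.length : Int) - 1).toNat + 1 =
        (PySem.Str.strip text).toList.length := by omega
    simp only [ht, if_neg, Bool.false_eq_true, not_false_iff,
      PySem.List.pyRange_one, pvFoldl_const, List.length_map, List.length_range, sub_zero]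
    rw [pvPw_eq, hm, pvZipSum_eq, ← pvStepA_eq]
    simp [String.join, String.append_assoc]
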